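-- pv_equiv track=rewrite | github.com/biruktito/aaac-membership-system | docs/tools/analyze_financials.py | find_member_by_name
-- ===== SOURCE A (Python) =====
-- def find_member_by_name(data: list, q: str):
--     ql = q.strip().lower()
--     for m in data:
--         if m.get('fullName', '').strip().lower() == ql:
--             return m
--     for m in data:
--         if ql in m.get('fullName', '').lower():
--             return m
--     return None
-- ===== SOURCE B (Python) =====
-- def find_member_by_name(data: list, q: str):
--     ql = q.strip().lower()
--     fallback = None
--     for m in data:
--         name = m.get('fullName', '')
--         if name.strip().lower() == ql:
--             return m
--         if fallback is None and ql in name.lower():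
--             fallback = m
--     return fallback
-- ===== Notes on version B (the rewrite author's own statement) =====
-- stated objective: simpler
-- what changed: Replaces A's two full scans (exact-match pass, then substring pass) with a single pass that returns on an exact match and keeps the first substring hit as a fallback.
import Mathlib
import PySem

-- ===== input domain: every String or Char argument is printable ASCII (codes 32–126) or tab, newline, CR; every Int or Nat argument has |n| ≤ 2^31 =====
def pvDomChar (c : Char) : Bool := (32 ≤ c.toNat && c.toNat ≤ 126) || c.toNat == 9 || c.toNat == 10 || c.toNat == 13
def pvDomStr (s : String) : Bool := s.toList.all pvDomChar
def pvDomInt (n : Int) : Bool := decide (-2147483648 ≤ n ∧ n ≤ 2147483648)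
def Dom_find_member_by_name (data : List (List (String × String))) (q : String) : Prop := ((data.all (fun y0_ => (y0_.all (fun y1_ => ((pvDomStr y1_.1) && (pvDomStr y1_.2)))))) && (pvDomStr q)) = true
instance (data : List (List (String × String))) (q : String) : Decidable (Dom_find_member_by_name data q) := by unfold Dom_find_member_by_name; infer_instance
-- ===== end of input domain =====

-- B merges A's two scans into a single pass that keeps the first substring hit as a fallback; objective: simpler (one traversal, same result).
-- ===== PORT A =====
-- m.get('fullName','') on an association-list dict: first match, else default (exact for the dict convention)
def pvGetName (m : List (String × String)) : String :=
  (((m.find? (fun p => p.1 == "fullName")).map Prod.snd).getD "")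

-- first loop of A: return the first exact (stripped, lowercased) match
def fmLoop1 (data : List (List (String × String))) (ql : String) : Option (List (String × String)) :=
  match data with
  | [] => none
  | m :: rest =>
    if PySem.Str.lower (PySem.Str.strip (pvGetName m)) == ql then some m else fmLoop1 rest ql

-- second loop of A: return the first substring match (no strip, per A)
def fmLoop2 (data : List (List (String × String))) (ql : String) : Option (List (String × String)) :=
  match data with
  | [] => none
  | m :: rest =>
    if PySem.Str.isIn ql (PySem.Str.lower (pvGetName m)) then some m else fmLoop2 rest ql

def find_member_by_name (data : List (List (String × String))) (q : String) : Option (List (String × String)) :=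
  let ql := PySem.Str.lower (PySem.Str.strip q)
  match fmLoop1 data ql with
  | some m => some m
  | none => fmLoop2 data ql

-- ===== PORT B =====
-- single pass carrying the fallback (first substring hit); exact match returns immediately
def fmLoopB (data : List (List (String × String))) (ql : String)
    (fallback : Option (List (String × String))) : Option (List (String × String)) :=
  match data with
  | [] => fallback
  | m :: rest =>
    let name := pvGetName m
    if PySem.Str.lower (PySem.Str.strip name) == ql then some m
    else fmLoopB rest ql
      (if fallback.isNone && PySem.Str.isIn ql (PySem.Str.lower name) then some m else fallback)

def find_member_by_name_alt (data : List (List (String × String))) (q : String) : Option (List (String × String)) :=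
  let ql := PySem.Str.lower (PySem.Str.strip q)
  fmLoopB data ql none

-- ===== PRECONDITION & SPEC =====
def Spec_find_member_by_name (data : List (List (String × String))) (q : String) (out : Option (List (String × String))) : Prop := out = find_member_by_name_alt data q
instance (data : List (List (String × String))) (q : String) (out : Option (List (String × String))) : Decidable (Spec_find_member_by_name data q out) := by unfold Spec_find_member_by_name; infer_instance

-- ===== CLAIM (what is proved, stated in full; the proofs are below) =====
def Claim_equal_find_member_by_name : Prop := ∀ (data : List (List (String × String))) (q : String), Dom_find_member_by_name data q → Spec_find_member_by_name data q (find_member_by_name data q)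

-- ===== LEMMAS AND PROOFS =====
-- the one-pass loop equals: exact scan, else the fallback, else the substring scan
theorem fmLoopB_eq (data : List (List (String × String))) (ql : String)
    (fb : Option (List (String × String))) :
    fmLoopB data ql fb = (fmLoop1 data ql).or (fb.or (fmLoop2 data ql)) := by
  induction data generalizing fb with
  | nil => simp [fmLoopB, fmLoop1, fmLoop2]
  | cons m rest ih =>
    simp only [fmLoopB, fmLoop1, fmLoop2]
    by_cases hx : PySem.Str.lower (PySem.Str.strip (pvGetName m)) == ql
    · simp [hx]
    · simp only [hx, ih]
      cases fb with
      | none => by_cases hs : PySem.Chars.isIn ql.toList (PySem.Chars.lower (pvGetName m).toList) = true <;> simp [hs]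
      | some f => simp

-- ===== VERDICT (by name: the statement is the Claim_ definition above) =====
theorem find_member_by_name_spec : Claim_equal_find_member_by_name := by
  intro data q _
  unfold Spec_find_member_by_name find_member_by_name find_member_by_name_alt
  rw [fmLoopB_eq]
  cases h : fmLoop1 data (PySem.Str.lower (PySem.Str.strip q)) <;> simp [h]
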